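-- pv_equiv track=rewrite | github.com/House1904/Final_Project_AI | solvers/sa_solver.py | conflicts
-- ===== SOURCE A (Python) =====
-- def conflicts(assignment):
--     seen = set()
--     conflict = 0
--     for path in assignment.values():
--         for cell in path:
--             if cell in seen:
--                 conflict += 1
--             seen.add(cell)
--     return conflict
-- ===== SOURCE B (Python) =====
-- def conflicts(assignment):
--     cells = sorted(cell for path in assignment.values() for cell in path)
--     dup = 0
--     for x, y in zip(cells, cells[1:]):
--         if x == y:
--             dup += 1
--     return dup
-- ===== Notes on version B (the rewrite author's own statement) =====
-- stated objective: alternative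
-- what changed: Replaces A's hash-set membership loop (increment on each already-seen cell) by a sort-based algorithm: flatten all cells, sort them so equal cells become adjacent, and count adjacent equal pairs; correct because each extra occurrence of a cell contributes exactly one adjacent-equal pair in sorted order.
import Mathlib
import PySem

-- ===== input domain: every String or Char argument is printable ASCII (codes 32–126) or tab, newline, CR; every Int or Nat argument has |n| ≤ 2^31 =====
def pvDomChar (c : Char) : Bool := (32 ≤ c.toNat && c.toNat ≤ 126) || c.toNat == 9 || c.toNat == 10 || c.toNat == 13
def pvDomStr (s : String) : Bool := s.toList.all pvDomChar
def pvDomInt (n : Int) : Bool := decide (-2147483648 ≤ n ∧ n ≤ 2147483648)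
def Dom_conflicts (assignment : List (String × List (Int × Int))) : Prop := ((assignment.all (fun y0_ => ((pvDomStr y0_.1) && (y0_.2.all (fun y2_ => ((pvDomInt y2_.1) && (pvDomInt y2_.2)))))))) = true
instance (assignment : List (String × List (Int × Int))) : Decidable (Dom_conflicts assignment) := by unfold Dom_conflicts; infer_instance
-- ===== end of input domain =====

-- B replaces A's incremental seen-set loop by a sort-based algorithm: flatten all cells,
-- sort, and count adjacent equal pairs (objective: alternative).

-- ===== PORT A =====
-- A's loop body: check membership in `seen`, bump `conflict` if present, then add the cell.
def conflictsStep (st : PySem.Set (Int × Int) × Int) (cell : Int × Int) :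
    PySem.Set (Int × Int) × Int :=
  (PySem.Set.add st.1 cell, if PySem.Set.contains st.1 cell then st.2 + 1 else st.2)

def conflicts (assignment : List (String × List (Int × Int))) : Int :=
  ((PySem.Dict.ofList assignment).values.foldl
      (fun st path => path.foldl conflictsStep st)
      (PySem.Set.empty, (0 : Int))).2

-- ===== PORT B =====
-- Source B: cells = sorted(flattened cells); then count adjacent equal pairs via zip(cells, cells[1:]).
def conflicts_alt (assignment : List (String × List (Int × Int))) : Int :=
  let cells := PySem.List.sorted2 ((PySem.Dict.ofList assignment).values.flatten)
      (fun c => c.1) (fun c => c.2)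
  (cells.zip (PySem.List.slice cells (some 1))).foldl
    (fun dup p => if p.1 == p.2 then dup + 1 else dup) 0

-- ===== PRECONDITION & SPEC =====
def Spec_conflicts (assignment : List (String × List (Int × Int))) (out : Int) : Prop := out = conflicts_alt assignment
instance (assignment : List (String × List (Int × Int))) (out : Int) : Decidable (Spec_conflicts assignment out) := by unfold Spec_conflicts; infer_instance

-- ===== CLAIM (what is proved, stated in full; the proofs are below) =====
def Claim_equal_conflicts : Prop := ∀ (assignment : List (String × List (Int × Int))), Dom_conflicts assignment → Spec_conflicts assignment (conflicts assignment)

-- ===== LEMMAS AND PROOFS =====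

-- The total preorder that sorted2 with keys (·.1), (·.2) arranges pairs by (lexicographic ≤).
def lexLE (a b : Int × Int) : Prop := a.1 < b.1 ∨ (a.1 = b.1 ∧ a.2 ≤ b.2)

-- sorted2's Boolean strict comparison for keys fst, snd (literally the `lt` in its definition).
def lexLT (a b : Int × Int) : Bool :=
  decide (a.1 < b.1) || (!decide (b.1 < a.1) && decide (a.2 < b.2))

theorem not_lexLT_iff (a b : Int × Int) : (lexLT b a = false) ↔ lexLE a b := by
  simp [lexLT, lexLE]; omega

theorem lexLE_antisymm {a b : Int × Int} (h1 : lexLE a b) (h2 : lexLE b a) : a = b := by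
  obtain ⟨x, y⟩ := a; obtain ⟨u, v⟩ := b
  simp [lexLE] at h1 h2
  have : x = u ∧ y = v := by omega
  simp [this.1, this.2]

theorem lexLT_true_imp {a b : Int × Int} (h : lexLT a b = true) : lexLE a b := by
  simp [lexLT, lexLE] at h ⊢; omega

theorem lexLE_trans {a b c : Int × Int} (h1 : lexLE a b) (h2 : lexLE b c) : lexLE a c := by
  simp [lexLE] at h1 h2 ⊢; omega

theorem pairwise_insertBy (x : Int × Int) (ys : List (Int × Int))
    (h : ys.Pairwise lexLE) : (PySem.List.insertBy lexLT x ys).Pairwise lexLE := by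
  induction ys with
  | nil => simp [PySem.List.insertBy, lexLE]
  | cons y t ih =>
    rw [List.pairwise_cons] at h
    by_cases hb : lexLT x y = true
    · have hxy : lexLE x y := lexLT_true_imp hb
      simp only [PySem.List.insertBy, hb, if_true]
      refine List.Pairwise.cons ?_ (List.Pairwise.cons h.1 h.2)
      intro z hz
      rcases List.mem_cons.mp hz with rfl | hzt
      · exact hxy
      · exact lexLE_trans hxy (h.1 z hzt)
    · have hb' : lexLT x y = false := by simpa using hb
      have hyx : lexLE y x := (not_lexLT_iff y x).mp hb'
      simp only [PySem.List.insertBy, hb', Bool.false_eq_true, if_false]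
      refine List.Pairwise.cons ?_ (ih h.2)
      intro z hz
      rcases (PySem.List.mem_insertBy lexLT x z t).mp hz with rfl | hzt
      · exact hyx
      · exact h.1 z hzt

theorem pairwise_sorted2 (xs : List (Int × Int)) :
    (PySem.List.sorted2 xs (fun c => c.1) (fun c => c.2) false).Pairwise lexLE := by
  show (xs.foldl (fun acc x => PySem.List.insertBy _ x acc) []).Pairwise lexLE
  generalize hacc : ([] : List (Int × Int)) = acc
  have hp : acc.Pairwise lexLE := by subst hacc; simp
  clear hacc
  induction xs generalizing acc with
  | nil => exact hp
  | cons x t ih =>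
    refine ih _ ?_
    have := pairwise_insertBy x acc hp
    simpa [lexLT] using this

-- distinct-count |set(l)| equals |l.toFinset|
theorem length_ofList_eq_card (l : List (Int × Int)) :
    (PySem.Set.ofList l).length = l.toFinset.card := by
  have hnd : (PySem.Set.ofList l).Nodup := PySem.Set.nodup_ofList l
  have hfs : (PySem.Set.ofList l).toFinset = l.toFinset := by
    ext x; simp [List.mem_toFinset, PySem.Set.mem_ofList]
  rw [← List.toFinset_card_of_nodup hnd, hfs]

-- Core counting fact: on a lexLE-sorted list, (number of adjacent equal pairs) + (number of
-- distinct elements) = length — equal elements are contiguous in such a list.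
theorem countAdj_sorted (s : List (Int × Int)) (hs : s.Pairwise lexLE) :
    ((s.zip (s.drop 1)).countP (fun p => p.1 == p.2)) + s.toFinset.card = s.length := by
  induction s with
  | nil => simp
  | cons x t ih =>
    cases t with
    | nil => simp
    | cons y u =>
      rw [List.pairwise_cons] at hs
      have ih' := ih hs.2
      simp only [List.drop_succ_cons, List.drop_zero, List.zip_cons_cons] at ih' ⊢
      by_cases hxy : x = y
      · subst hxy
        rw [List.toFinset_cons, Finset.insert_eq_self.mpr (by simp : x ∈ (x :: u).toFinset)]
        rw [List.countP_cons]
        simp only [List.length_cons] at ih' ⊢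
        simp only [beq_self_eq_true, if_true]
        omega
      · have hxnot : x ∉ (y :: u).toFinset := by
          simp only [List.mem_toFinset]
          intro hmem
          rcases List.mem_cons.mp hmem with rfl | hxu
          · exact hxy rfl
          · -- x in u: lexLE x y (head) and lexLE y x (from pairwise of y::u) force x = y
            have h1 : lexLE x y := hs.1 y (by simp)
            have h2 : lexLE y x := (List.pairwise_cons.mp hs.2).1 x hxu
            exact hxy (lexLE_antisymm h1 h2)
        have hc : (x == y) = false := beq_eq_false_iff_ne.mpr hxy
        rw [List.countP_cons]
        simp only [hc, Bool.false_eq_true, if_false]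
        rw [List.toFinset_cons, Finset.card_insert_of_notMem hxnot]
        simp only [List.length_cons] at ih' ⊢
        omega

-- Invariant of A's loop over a flat cell list: the seen set becomes `Set.update s l`,
-- and conflict + |seen| grows exactly by |l|.
theorem conflictsStep_foldl (l : List (Int × Int)) (s : PySem.Set (Int × Int)) (c : Int) :
    (l.foldl conflictsStep (s, c)).1 = PySem.Set.update s l ∧
    (l.foldl conflictsStep (s, c)).2 + ((l.foldl conflictsStep (s, c)).1.length : Int)
      = c + l.length + s.length := by
  induction l generalizing s c with
  | nil => simp [PySem.Set.update]
  | cons x xs ih =>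
    by_cases h : x ∈ s
    · have hadd : PySem.Set.add s x = s := by
        simp [PySem.Set.add, PySem.Set.contains, h]
      have hstep : conflictsStep (s, c) x = (s, c + 1) := by
        simp [conflictsStep, PySem.Set.contains, h]
      obtain ⟨h1, h2⟩ := ih s (c + 1)
      refine ⟨?_, ?_⟩
      · rw [List.foldl_cons, hstep, h1]
        simp [PySem.Set.update, hadd]
      · rw [List.foldl_cons, hstep]
        simp only [List.length_cons]
        push_cast at h2 ⊢
        omega
    · have hadd : PySem.Set.add s x = s ++ [x] := by
        simp [PySem.Set.add, PySem.Set.contains, h]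
      have hstep : conflictsStep (s, c) x = (s ++ [x], c) := by
        simp [conflictsStep, PySem.Set.contains, h]
      obtain ⟨h1, h2⟩ := ih (s ++ [x]) c
      refine ⟨?_, ?_⟩
      · rw [List.foldl_cons, hstep, h1]
        simp [PySem.Set.update, hadd]
      · rw [List.foldl_cons, hstep]
        simp only [List.length_cons, List.length_append, List.length_nil] at h2 ⊢
        push_cast at h2 ⊢
        omega

-- A computes |L| - |set(L)| where L is the flattened cell list.
theorem conflicts_eq (assignment : List (String × List (Int × Int))) :
    conflicts assignment
      = ((PySem.Dict.ofList assignment).values.flatten.length : Int)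
        - ((PySem.Dict.ofList assignment).values.flatten.toFinset.card : Int) := by
  unfold conflicts
  rw [show ((PySem.Dict.ofList assignment).values.foldl
        (fun st path => path.foldl conflictsStep st) (PySem.Set.empty, (0 : Int)))
      = ((PySem.Dict.ofList assignment).values.flatten.foldl conflictsStep
        (PySem.Set.empty, (0 : Int))) from (List.foldl_flatten).symm]
  obtain ⟨h1, h2⟩ := conflictsStep_foldl
    ((PySem.Dict.ofList assignment).values.flatten) PySem.Set.empty 0
  have hupd : PySem.Set.update PySem.Set.empty
      ((PySem.Dict.ofList assignment).values.flatten)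
      = PySem.Set.ofList ((PySem.Dict.ofList assignment).values.flatten) := by
    simp [PySem.Set.update, PySem.Set.ofList_eq_foldl, PySem.Set.empty]
  rw [h1, hupd] at h2
  rw [length_ofList_eq_card] at h2
  simp only [PySem.Set.empty, List.length_nil] at h2 ⊢
  omega

theorem conflicts_spec : Claim_equal_conflicts := by
  intro assignment _
  unfold Spec_conflicts conflicts_alt
  set L := (PySem.Dict.ofList assignment).values.flatten with hL
  dsimp only
  set s := PySem.List.sorted2 L (fun c => c.1) (fun c => c.2) false with hs
  have hperm : s.Perm L := PySem.List.sorted2_perm L _ _ false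
  rw [PySem.List.slice_from s (by norm_num : (0:Int) ≤ 1)]
  rw [PySem.List.foldl_if_add_one (fun p => p.1 == p.2) (s.zip (s.drop (1:Int).toNat)) 0]
  have hcnt := countAdj_sorted s (pairwise_sorted2 L)
  have hlen : s.length = L.length := hperm.length_eq
  have hfs : s.toFinset = L.toFinset := by
    ext x; simp [hperm.mem_iff]
  rw [conflicts_eq assignment, ← hL]
  simp only [Int.toNat_one] at *
  rw [hlen, hfs] at hcnt
  omega
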